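-- pv_equiv track=rewrite | github.com/jmchandonia/CORAL | back_end/python/coral/arango_service.py | __to_type2objects
-- ===== SOURCE A (Python) =====
-- def __to_type2objects(aql_rs):
--     type2objects = {}
--     for row in aql_rs:
--         _id = row['_id']
--         type_name = _id.split('/')[0][4:]
--
--         objs = type2objects.get(type_name)
--         if objs is None:
--             objs = []
--             type2objects[type_name] = objs
--         objs.append(row)
--
--     return type2objects
-- ===== SOURCE B (Python) =====
-- def __to_type2objects(aql_rs):
--     def type_name(row):
--         return row['_id'].split('/')[0][4:]
--     names = dict.fromkeys(type_name(row) for row in aql_rs)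
--     return {name: [row for row in aql_rs if type_name(row) == name]
--             for name in names}
-- ===== Notes on version B (the rewrite author's own statement) =====
-- stated objective: alternative
-- what changed: Replaces the single-pass dict bucketing with a two-pass scheme: first collect the distinct type names in first-occurrence order (dict.fromkeys), then build each group by filtering the row list per name.
import Mathlib
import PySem

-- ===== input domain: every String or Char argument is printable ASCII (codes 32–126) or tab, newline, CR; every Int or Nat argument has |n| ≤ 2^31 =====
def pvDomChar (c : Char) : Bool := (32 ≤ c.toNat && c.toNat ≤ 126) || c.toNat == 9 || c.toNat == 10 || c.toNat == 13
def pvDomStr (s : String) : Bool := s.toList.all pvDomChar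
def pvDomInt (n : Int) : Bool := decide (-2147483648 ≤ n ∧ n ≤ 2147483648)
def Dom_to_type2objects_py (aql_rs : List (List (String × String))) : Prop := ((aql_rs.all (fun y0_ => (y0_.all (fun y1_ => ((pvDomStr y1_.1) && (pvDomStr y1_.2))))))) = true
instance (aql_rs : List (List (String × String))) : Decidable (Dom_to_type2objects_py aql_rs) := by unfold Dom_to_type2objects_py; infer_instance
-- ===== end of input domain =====

-- B replaces A's one-pass dict bucketing by a two-pass scheme: collect the distinct type
-- names in first-occurrence order, then build each group by filtering the rows (objective: alternative).


-- shared helper: row['_id'].split('/')[0][4:]  (row['_id'] via getD ""; Pre_ excludes rows without '_id')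
def pvTypeName (row : List (String × String)) : String :=
  PySem.Str.slice
    (PySem.List.pyGetD ((PySem.Str.split? (PySem.Dict.getD ⟨row⟩ "_id" "") "/").getD []) 0 "")
    (some 4) none

-- ===== PORT A =====
def to_type2objects_py (aql_rs : List (List (String × String))) : List (String × List (List (String × String))) :=
  (aql_rs.foldl (fun d row =>
      let type_name := pvTypeName row
      match d.get? type_name with
      | none => d.insert type_name [row]           -- objs = []; type2objects[type_name] = objs; objs.append(row)
      | some objs => d.insert type_name (objs ++ [row])  -- objs.append(row) mutates the stored list in place
    ) PySem.Dict.empty).items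

-- ===== PORT B =====
def to_type2objects_py_alt (aql_rs : List (List (String × String))) : List (String × List (List (String × String))) :=
  (PySem.List.dedup (aql_rs.map pvTypeName)).map   -- names = dict.fromkeys(...)
    (fun name => (name, aql_rs.filter (fun row => pvTypeName row == name)))

-- ===== PRECONDITION & SPEC =====
-- Pre_ excludes rows without an '_id' key, on which the Python A raises KeyError.
def Pre_to_type2objects_py (aql_rs : List (List (String × String))) : Prop :=
  ∀ row ∈ aql_rs, "_id" ∈ row.map Prod.fst
instance (aql_rs : List (List (String × String))) : Decidable (Pre_to_type2objects_py aql_rs) := by unfold Pre_to_type2objects_py; infer_instance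

def pvWitness_to_type2objects_py : (List (List (String × String))) :=
  [[("_id", "abcXYZ/1")], [("_id", "abcdA/2"), ("v", "3")], [("_id", "abcXYZ/7")]]

def Spec_to_type2objects_py (aql_rs : List (List (String × String))) (out : List (String × List (List (String × String)))) : Prop := out = to_type2objects_py_alt aql_rs
instance (aql_rs : List (List (String × String))) (out : List (String × List (List (String × String)))) : Decidable (Spec_to_type2objects_py aql_rs out) := by unfold Spec_to_type2objects_py; infer_instance

-- ===== CLAIM (what is proved, stated in full; the proofs are below) =====
def Claim_equal_to_type2objects_py : Prop := ∀ (aql_rs : List (List (String × String))), Dom_to_type2objects_py aql_rs → Pre_to_type2objects_py aql_rs → Spec_to_type2objects_py aql_rs (to_type2objects_py aql_rs)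

-- ===== LEMMAS AND PROOFS =====

-- A's loop body is exactly Dict.modify with default [] and append
theorem pv_step_eq (d : PySem.Dict String (List (List (String × String)))) (row : List (String × String)) :
    (let type_name := pvTypeName row
     match d.get? type_name with
     | none => d.insert type_name [row]
     | some objs => d.insert type_name (objs ++ [row]))
    = d.modify (pvTypeName row) [] (fun x => x ++ [row]) := by
  rw [show d.modify (pvTypeName row) [] (fun x => x ++ [row])
        = d.insert (pvTypeName row) ((d.getD (pvTypeName row) []) ++ [row]) from rfl,
      PySem.Dict.getD_eq_get?_getD]
  cases h : d.get? (pvTypeName row) <;> simp [h]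

-- keys of the modify-fold are the Set.add-fold of the type names
theorem pv_keys_fold (l : List (List (String × String)))
    (d : PySem.Dict String (List (List (String × String)))) (hnd : d.keys.Nodup) :
    (l.foldl (fun d row => d.modify (pvTypeName row) [] (fun x => x ++ [row])) d).keys
      = l.foldl (fun s row => PySem.Set.add s (pvTypeName row)) d.keys := by
  induction l generalizing d with
  | nil => rfl
  | cons r rs ih =>
    simp only [List.foldl_cons]
    by_cases hm : pvTypeName r ∈ d.keys
    · have hc : d.contains (pvTypeName r) = true := by
        rw [PySem.Dict.contains_eq_decide_mem_keys]; simpa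
      have hk : (d.modify (pvTypeName r) [] (fun x => x ++ [r])).keys = d.keys := by
        rw [PySem.Dict.keys_modify, PySem.Dict.keys_insert_of_contains _ _ hc]
      rw [ih _ (by rw [hk]; exact hnd), hk]
      simp [PySem.Set.add, hm]
    · have hc : d.contains (pvTypeName r) = false := by
        rw [PySem.Dict.contains_eq_decide_mem_keys]; simpa
      have hk : (d.modify (pvTypeName r) [] (fun x => x ++ [r])).keys = d.keys ++ [pvTypeName r] := by
        rw [PySem.Dict.keys_modify, PySem.Dict.keys_insert_of_not_contains _ _ hc]
      have hnd' : (d.keys ++ [pvTypeName r]).Nodup := by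
        refine List.Nodup.append hnd (List.nodup_singleton _) ?_
        intro a ha hb
        simp only [List.mem_singleton] at hb
        exact hm (hb ▸ ha)
      rw [ih _ (by rw [hk]; exact hnd'), hk]
      simp [PySem.Set.add, hm]

-- group contents of the modify-fold: value at key c is the rows whose type name is c
theorem pv_getD_fold (l : List (List (String × String)))
    (d : PySem.Dict String (List (List (String × String)))) (c : String) :
    (l.foldl (fun d row => d.modify (pvTypeName row) [] (fun x => x ++ [row])) d).getD c []
      = d.getD c [] ++ l.filter (fun row => pvTypeName row == c) := by
  have h := PySem.Dict.getD_foldl_modify_append (l.map (fun r => (pvTypeName r, r))) d c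
  rw [List.foldl_map] at h
  simpa [List.filter_map, Function.comp_def] using h

-- ===== VERDICT (by name: the statement is the Claim_ definition above) =====
theorem to_type2objects_py_spec : Claim_equal_to_type2objects_py := by
  intro aql_rs _ _
  show to_type2objects_py aql_rs = to_type2objects_py_alt aql_rs
  unfold to_type2objects_py to_type2objects_py_alt
  have hstep : (fun (d : PySem.Dict String (List (List (String × String)))) row =>
      let type_name := pvTypeName row
      match d.get? type_name with
      | none => d.insert type_name [row]
      | some objs => d.insert type_name (objs ++ [row]))
      = fun d row => d.modify (pvTypeName row) [] (fun x => x ++ [row]) := by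
    funext d row; exact pv_step_eq d row
  rw [hstep]
  have hnodup : (aql_rs.foldl (fun d row => d.modify (pvTypeName row) [] (fun x => x ++ [row]))
      PySem.Dict.empty).keys.Nodup :=
    PySem.Dict.nodup_keys_foldl_modify_key aql_rs pvTypeName [] (fun _ row v => v ++ [row]) _
      PySem.Dict.nodup_keys_empty
  rw [PySem.Dict.items_eq_map_keys _ hnodup []]
  rw [pv_keys_fold _ _ PySem.Dict.nodup_keys_empty]
  have hkeys : aql_rs.foldl (fun s row => PySem.Set.add s (pvTypeName row))
      (PySem.Dict.empty : PySem.Dict String (List (List (String × String)))).keys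
      = PySem.List.dedup (aql_rs.map pvTypeName) := by
    rw [PySem.List.dedup_eq_ofList, PySem.Set.ofList_eq_foldl, List.foldl_map]
    rfl
  rw [hkeys]
  apply List.map_congr_left
  intro k _
  rw [pv_getD_fold, PySem.Dict.getD_empty]
  simp
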